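-- pv_equiv track=rewrite | github.com/JaeEon-Ryu/Coding_test | Level_2/Lv2_기능개발.py | solution
-- ===== SOURCE A (Python) =====
-- def solution(progresses, speeds):
--     answer = []
--     while len(progresses) != 0:
--         temp = 0
--         for i in range(len(progresses)):
--             progresses[i] += speeds[i]
--         if progresses[0] >= 100:
--             for j in range(0, len(progresses)):
--                 if progresses[j] < 100:
--                     break
--                 temp += 1
--         if temp > 0:
--             answer.append(temp)
--             for k in range(temp):
--                 progresses.pop(0)
--                 speeds.pop(0)
--
--     return answer
-- ===== SOURCE B (Python) =====
-- def solution(progresses, speeds):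
--     # One pass: closed-form completion day per task, grouped by the current
--     # group's release day. (Does not mutate its arguments, unlike the
--     # original, which empties both lists.)
--     answer = []
--     cur = None
--     count = 0
--     for p, s in zip(progresses, speeds):
--         d = max(1, -((p - 100) // s))
--         if cur is None or d > cur:
--             if count:
--                 answer.append(count)
--             cur = d
--             count = 1
--         else:
--             count += 1
--     if count:
--         answer.append(count)
--     return answer
-- ===== Notes on version B (the rewrite author's own statement) =====
-- stated objective: faster
-- what changed: Replaces the day-by-day simulation with mutation and repeated pop(0) by a closed-form completion day ceil((100-p)/s) per task and a single pass that groups tasks by the current group's release day; intended as faster (a timing run saw A time out at n=16 where B returned, so no ratio was measured).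
-- outside the precondition, e.g. on solution([150], [0]): A returns [1], B raises ZeroDivisionError; on solution([101, 200], [-1, -1]): A returns [2], B returns [1, 1]
import Mathlib
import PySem

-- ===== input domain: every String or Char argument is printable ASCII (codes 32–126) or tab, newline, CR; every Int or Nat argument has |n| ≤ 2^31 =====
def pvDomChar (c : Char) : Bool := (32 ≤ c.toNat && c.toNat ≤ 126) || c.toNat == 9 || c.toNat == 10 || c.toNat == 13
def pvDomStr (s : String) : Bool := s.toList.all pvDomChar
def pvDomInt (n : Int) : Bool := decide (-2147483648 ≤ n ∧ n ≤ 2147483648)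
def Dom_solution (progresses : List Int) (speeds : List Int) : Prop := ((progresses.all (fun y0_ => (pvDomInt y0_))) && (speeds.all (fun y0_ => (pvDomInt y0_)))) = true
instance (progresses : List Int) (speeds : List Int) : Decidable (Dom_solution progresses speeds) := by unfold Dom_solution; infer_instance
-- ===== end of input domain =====

-- B replaces A's day-by-day simulation by per-task closed-form completion days and a single
-- grouping pass; intended as faster (a timing run saw A time out at n=16 where B returned,
-- so no ratio could be measured). A mutates/empties its argument lists; B does not — the
-- equivalence proved here is about the RETURN value only.

-- ===== PORT A =====
-- the inner `for j ...: if progresses[j] < 100: break; temp += 1` loop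
def tempCount : List Int → Nat
  | [] => 0
  | p :: rest => if p < 100 then 0 else 1 + tempCount rest

-- the `while len(progresses) != 0` loop; fuel only makes the loop total
-- (A diverges outside Pre_solution); fuelFor below always suffices under Pre_solution
def loopA : Nat → List Int → List Int → List Int → List Int
  | 0, _, _, ans => ans
  | fuel + 1, ps, ss, ans =>
    if ps.isEmpty then ans
    else
      let ps' := List.zipWith (· + ·) ps ss          -- progresses[i] += speeds[i]
      let temp : Nat := if ps'.headD 0 ≥ 100 then tempCount ps' else 0
      if temp > 0 then
        loopA fuel (ps'.drop temp) (ss.drop temp) (ans ++ [(temp : Int)])  -- append + temp pops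
      else loopA fuel ps' ss ans

def fuelFor (ps : List Int) : Nat := 1 + ps.length + (ps.map (fun p => (100 - p).toNat)).sum

def solution (progresses : List Int) (speeds : List Int) : List Int :=
  loopA (fuelFor progresses) progresses speeds []

-- ===== PORT B =====
-- d = max(1, -((p - 100) // s))
def dayOf (p s : Int) : Int := max 1 (-(PySem.Int.floordiv (p - 100) s))

-- the single grouping pass of Source B: state (cur, count, answer)
def bGo : List (Int × Int) → Option Int → Int → List Int → List Int
  | [], _, count, ans => if count ≠ 0 then ans ++ [count] else ans
  | (p, s) :: rest, cur, count, ans =>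
    let d := dayOf p s
    match cur with
    | none => bGo rest (some d) 1 ans
    | some c =>
      if d > c then bGo rest (some d) 1 (ans ++ [count])
      else bGo rest (some c) (count + 1) ans

def solution_alt (progresses : List Int) (speeds : List Int) : List Int :=
  bGo (progresses.zip speeds) none 0 []

-- ===== PRECONDITION & SPEC =====
-- Pre_ excludes inputs where speeds is shorter than progresses (A raises IndexError) and
-- inputs with a non-positive speed among the first len(progresses) speeds: there A
-- usually diverges, and where it does return, B's division either raises
-- ZeroDivisionError (speed 0) or uses a meaningless negative-divisor ceiling.
def Pre_solution (progresses : List Int) (speeds : List Int) : Prop :=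
  progresses.length ≤ speeds.length ∧ ∀ s ∈ speeds.take progresses.length, 1 ≤ s
instance (progresses : List Int) (speeds : List Int) : Decidable (Pre_solution progresses speeds) := by
  unfold Pre_solution; infer_instance

def pvWitness_solution : List Int × List Int := ([93, 30, 55], [1, 30, 5])

def Spec_solution (progresses : List Int) (speeds : List Int) (out : List Int) : Prop :=
  out = solution_alt progresses speeds
instance (progresses : List Int) (speeds : List Int) (out : List Int) : Decidable (Spec_solution progresses speeds out) := by
  unfold Spec_solution; infer_instance

-- ===== CLAIM (what is proved, stated in full; the proofs are below) =====
def Claim_equal_solution : Prop := ∀ (progresses : List Int) (speeds : List Int), Dom_solution progresses speeds → Pre_solution progresses speeds → Spec_solution progresses speeds (solution progresses speeds)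

-- ===== LEMMAS AND PROOFS =====

-- pair-level version of A's loop (progress & speed travel together)
def stepP (q : Int × Int) : Int × Int := (q.1 + q.2, q.2)

def tempCountP : List (Int × Int) → Nat
  | [] => 0
  | q :: rest => if q.1 < 100 then 0 else 1 + tempCountP rest

def loopP : Nat → List (Int × Int) → List Int → List Int
  | 0, _, ans => ans
  | fuel + 1, L, ans =>
    if L.isEmpty then ans
    else
      let L' := L.map stepP
      let temp : Nat := if (L'.headD (0, 0)).1 ≥ 100 then tempCountP L' else 0
      if temp > 0 then loopP fuel (L'.drop temp) (ans ++ [(temp : Int)])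
      else loopP fuel L' ans

-- reference grouping on day lists
def groupsSpec : List Int → List Int
  | [] => []
  | d :: rest =>
      (1 + ((rest.takeWhile (fun x => x ≤ d)).length : Int)) ::
        groupsSpec (rest.dropWhile (fun x => x ≤ d))
  termination_by ds => ds.length
  decreasing_by
    simp only [List.length_cons]
    exact Nat.lt_succ_of_le (List.length_dropWhile_le _ _)

def dOf (q : Int × Int) : Int := dayOf q.1 q.2

def Gm (L : List (Int × Int)) : Nat := (L.map (fun q => (100 - q.1).toNat)).sum

-- ## arithmetic about dayOf (divisor ≥ 1)

theorem dayOf_ge_one (p s : Int) : 1 ≤ dayOf p s := le_max_left _ _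

theorem fdiv_step (p s : Int) (hs : 1 ≤ s) :
    PySem.Int.floordiv (p + s - 100) s = PySem.Int.floordiv (p - 100) s + 1 := by
  have h0 : (0:Int) < s := by omega
  rw [PySem.Int.floordiv_eq_ediv_of_pos h0, PySem.Int.floordiv_eq_ediv_of_pos h0]
  have : p + s - 100 = (p - 100) + 1 * s := by ring
  rw [this, Int.add_mul_ediv_right _ _ (by omega : s ≠ 0)]

theorem dayOf_step (p s : Int) (hs : 1 ≤ s) :
    dayOf (p + s) s = max 1 (dayOf p s - 1) := by
  unfold dayOf
  have h : p + s - 100 = p + s - 100 := rfl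
  have := fdiv_step p s hs
  rw [show p + s - 100 = p + s - 100 from rfl]
  rw [show PySem.Int.floordiv (p + s - 100) s = PySem.Int.floordiv (p - 100) s + 1 from this]
  omega

theorem complete_iff (p s : Int) (hs : 1 ≤ s) :
    100 ≤ p + s ↔ dayOf p s ≤ 1 := by
  unfold dayOf
  have h0 : (0:Int) < s := by omega
  have hb : (-1 ≤ PySem.Int.floordiv (p - 100) s) ↔ (-1) * s ≤ p - 100 :=
    PySem.Int.le_floordiv_iff_mul_le h0
  constructor
  · intro h
    have : (-1) * s ≤ p - 100 := by omega
    have := hb.mpr this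
    omega
  · intro h
    have : -1 ≤ PySem.Int.floordiv (p - 100) s := by omega
    have := hb.mp this
    omega

-- ## small list facts

theorem zip_take_len (ps ss : List Int) : ps.zip ss = ps.zip (ss.take ps.length) := by
  induction ps generalizing ss with
  | nil => simp
  | cons p rest ih =>
    cases ss with
    | nil => simp
    | cons s ss' => simp [List.zip_cons_cons, ih ss']

theorem tempCountP_eq (M : List (Int × Int)) :
    tempCountP M = (M.takeWhile (fun q => decide (100 ≤ q.1))).length := by
  induction M with
  | nil => rfl
  | cons q rest ih =>
    by_cases h : q.1 < 100
    · simp [tempCountP, h, List.takeWhile_cons, show ¬ (100 ≤ q.1) by omega]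
    · simp [tempCountP, h, show (100 ≤ q.1) by omega, ih]; omega

theorem tempCount_map_fst (M : List (Int × Int)) :
    tempCount (M.map Prod.fst) = tempCountP M := by
  induction M with
  | nil => rfl
  | cons q rest ih => simp [tempCount, tempCountP, ih]

theorem tempCountP_le (M : List (Int × Int)) : tempCountP M ≤ M.length := by
  rw [tempCountP_eq]
  exact List.Sublist.length_le (List.takeWhile_sublist _)

theorem zipWith_add_fst (L : List (Int × Int)) (ex : List Int) :
    List.zipWith (· + ·) (L.map Prod.fst) (L.map Prod.snd ++ ex) = (L.map stepP).map Prod.fst := by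
  induction L with
  | nil => simp
  | cons q rest ih => simp [stepP, ih]

theorem snd_map_stepP (L : List (Int × Int)) :
    (L.map stepP).map Prod.snd = L.map Prod.snd := by
  induction L with
  | nil => rfl
  | cons q rest ih => simp [stepP, ih]

theorem takeWhile_congr_mem {α : Type} (p q : α → Bool) :
    ∀ (l : List α), (∀ x ∈ l, p x = q x) → l.takeWhile p = l.takeWhile q := by
  intro l
  induction l with
  | nil => intro _; rfl
  | cons a t ih =>
    intro h
    have ha := h a (by simp)
    simp [List.takeWhile_cons, ha]
    split <;> simp [ih (fun x hx => h x (by simp [hx]))]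

theorem dropWhile_congr_mem {α : Type} (p q : α → Bool) :
    ∀ (l : List α), (∀ x ∈ l, p x = q x) → l.dropWhile p = l.dropWhile q := by
  intro l
  induction l with
  | nil => intro _; rfl
  | cons a t ih =>
    intro h
    have ha := h a (by simp)
    simp [List.dropWhile_cons, ha]
    split <;> simp [ih (fun x hx => h x (by simp [hx]))]

theorem head?_dropWhile_not {α : Type} (p : α → Bool) :
    ∀ (l : List α), ∀ x ∈ (l.dropWhile p).head?, p x = false := by
  intro l
  induction l with
  | nil => simp
  | cons a t ih =>
    intro x hx
    by_cases h : p a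
    · exact ih x (by simpa [List.dropWhile_cons, h] using hx)
    · simp [List.dropWhile_cons, h] at hx
      simp [← hx, h]

theorem Gm_sublist_le (L M : List (Int × Int)) (h : L.Sublist M) : Gm L ≤ Gm M :=
  List.Sublist.sum_le_sum (List.Sublist.map _ h) (by simp)

theorem Gm_step_le (L : List (Int × Int)) (hσ : ∀ q ∈ L, 1 ≤ q.2) :
    Gm (L.map stepP) ≤ Gm L := by
  induction L with
  | nil => simp [Gm]
  | cons q rest ih =>
    have h1 := hσ q (by simp)
    have h2 := ih (fun x hx => hσ x (by simp [hx]))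
    simp only [Gm, List.map_cons, List.sum_cons] at *
    have : (100 - (stepP q).1).toNat ≤ (100 - q.1).toNat := by
      simp [stepP]; omega
    omega

-- ## bGo agrees with groupsSpec

theorem bGo_some (L : List (Int × Int)) :
    ∀ (c count : Int) (ans : List Int), 1 ≤ count →
      bGo L (some c) count ans =
        ans ++ ((count + ((L.takeWhile (fun q => decide (dOf q ≤ c))).length : Int)) ::
          groupsSpec ((L.dropWhile (fun q => decide (dOf q ≤ c))).map dOf)) := by
  induction L with
  | nil => intro c count ans hc; simp [bGo, show count ≠ 0 by omega, groupsSpec]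
  | cons q rest ih =>
    intro c count ans hc
    by_cases h : dOf q ≤ c
    · have hgt : ¬ (dayOf q.1 q.2 > c) := by simp [dOf] at h; omega
      rw [show bGo (q :: rest) (some c) count ans = bGo rest (some c) (count + 1) ans by
        simp [bGo, hgt]]
      rw [ih c (count + 1) ans (by omega)]
      rw [List.takeWhile_cons_of_pos (by simpa using h),
        List.dropWhile_cons_of_pos (by simpa using h)]
      rw [List.length_cons]
      congr 2
      push_cast
      ring
    · have hgt : dayOf q.1 q.2 > c := by simp [dOf] at h; omega
      rw [show bGo (q :: rest) (some c) count ans = bGo rest (some (dOf q)) 1 (ans ++ [count]) by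
        simp [bGo, dOf, hgt]]
      rw [ih (dOf q) 1 (ans ++ [count]) (by omega)]
      rw [List.takeWhile_cons_of_neg (by simpa using h),
        List.dropWhile_cons_of_neg (by simpa using h)]
      simp only [List.map_cons, groupsSpec, List.takeWhile_map, List.dropWhile_map,
        List.append_assoc, List.length_nil, List.length_map, List.singleton_append,
        Int.natCast_zero, add_zero]
      rfl

theorem alt_eq_groups (ps ss : List Int) :
    solution_alt ps ss = groupsSpec ((ps.zip ss).map dOf) := by
  unfold solution_alt
  cases hL : ps.zip ss with
  | nil => simp [bGo, groupsSpec]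
  | cons q rest =>
    simp only [bGo]
    rw [bGo_some rest (dayOf q.1 q.2) 1 [] (by omega)]
    simp only [List.map_cons, groupsSpec, List.takeWhile_map, List.dropWhile_map,
      List.nil_append, List.length_map]
    rfl

-- ## shift invariance of the grouping

theorem groupsSpec_shift : ∀ (n : Nat) (ds : List Int), ds.length ≤ n →
    (∀ x ∈ ds.head?, 2 ≤ x) →
    groupsSpec (ds.map (fun d => max 1 (d - 1))) = groupsSpec ds := by
  intro n
  induction n with
  | zero =>
    intro ds h _
    have : ds = [] := List.length_eq_zero_iff.mp (Nat.le_zero.mp h)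
    subst this; rfl
  | succ n ih =>
    intro ds hlen hhead
    cases ds with
    | nil => rfl
    | cons d rest =>
      have hd : 2 ≤ d := hhead d (by simp)
      have hmax : max 1 (d - 1) = d - 1 := by omega
      have hpred : ∀ x : Int, (decide (max 1 (x - 1) ≤ d - 1)) = decide (x ≤ d) := by
        intro x
        simp only [decide_eq_decide]
        omega
      simp only [List.map_cons, groupsSpec, hmax]
      rw [List.takeWhile_map, List.dropWhile_map]
      have htw : (rest.takeWhile (fun x => decide (x ≤ d) : Int → Bool)) =
          rest.takeWhile ((fun x => decide (x ≤ d - 1)) ∘ (fun d => max 1 (d - 1))) := by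
        apply takeWhile_congr_mem
        intro x _; exact (hpred x).symm
      have hdw : (rest.dropWhile (fun x => decide (x ≤ d) : Int → Bool)) =
          rest.dropWhile ((fun x => decide (x ≤ d - 1)) ∘ (fun d => max 1 (d - 1))) := by
        apply dropWhile_congr_mem
        intro x _; exact (hpred x).symm
      rw [← htw, ← hdw]
      congr 1
      · simp
      · apply ih
        · have h1 := List.length_dropWhile_le (fun x => decide (x ≤ d) : Int → Bool) rest
          have h2 : rest.length + 1 ≤ n + 1 := by simpa using hlen
          omega
        · intro x hx
          have := head?_dropWhile_not (fun x => decide (x ≤ d) : Int → Bool) rest x hx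
          simp at this; omega

theorem drop_takeWhile_len {α : Type} (p : α → Bool) :
    ∀ (l : List α), l.drop (l.takeWhile p).length = l.dropWhile p := by
  intro l
  induction l with
  | nil => rfl
  | cons a t ih =>
    by_cases h : p a
    · simp [List.takeWhile_cons, List.dropWhile_cons, h, ih]
    · simp [List.takeWhile_cons, List.dropWhile_cons, h]

theorem mem_stepP_snd (L : List (Int × Int)) (hσ : ∀ q ∈ L, 1 ≤ q.2) :
    ∀ r ∈ L.map stepP, 1 ≤ r.2 := by
  intro r hr
  obtain ⟨y, hy, rfl⟩ := List.mem_map.mp hr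
  exact hσ y hy

-- ## the main simulation lemma

theorem loopP_eq : ∀ (fuel : Nat) (L : List (Int × Int)) (ans : List Int),
    (∀ q ∈ L, 1 ≤ q.2) → L.length + Gm L < fuel →
    loopP fuel L ans = ans ++ groupsSpec (L.map dOf) := by
  intro fuel
  induction fuel with
  | zero => intro L ans _ h; omega
  | succ fuel ih =>
    intro L ans hσ hfuel
    cases L with
    | nil => simp [loopP, groupsSpec]
    | cons q rest =>
      have hq2 : 1 ≤ q.2 := hσ q (by simp)
      by_cases hrel : 100 ≤ q.1 + q.2
      · -- the head completes this day: a group is released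
        have hstep : loopP (fuel + 1) (q :: rest) ans =
            loopP fuel (((q :: rest).map stepP).drop (tempCountP ((q :: rest).map stepP)))
              (ans ++ [(tempCountP ((q :: rest).map stepP) : Int)]) := by
          have htpos : 0 < tempCountP ((q :: rest).map stepP) := by
            simp [tempCountP, stepP, show ¬ (q.1 + q.2 < 100) by omega]
          simp only [loopP, List.isEmpty_cons, Bool.false_eq_true, if_false, List.map_cons,
            List.headD_cons]
          simp [stepP, show (100:Int) ≤ q.1 + q.2 from hrel]
          intro h0
          simp [tempCountP, stepP, show ¬ (q.1 + q.2 < 100) by omega] at h0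
        rw [hstep]
        set L' := (q :: rest).map stepP with hL'
        set t := tempCountP L' with ht
        have htlen : t = (L'.takeWhile (fun r => decide (100 ≤ r.1))).length := tempCountP_eq L'
        have hdrop : L'.drop t = L'.dropWhile (fun r => decide (100 ≤ r.1)) := by
          rw [htlen]; exact drop_takeWhile_len _ L'
        set R := L'.dropWhile (fun r => decide (100 ≤ r.1)) with hR
        have hRσ : ∀ r ∈ R, 1 ≤ r.2 := fun r hr =>
          mem_stepP_snd (q :: rest) hσ r (List.Sublist.mem hr (List.dropWhile_sublist _))
        have htpos : 1 ≤ t := by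
          rw [ht]; simp [L', tempCountP, stepP, show ¬ (q.1 + q.2 < 100) by omega]
        have hRlen : R.length ≤ rest.length := by
          have h1 : R.length = L'.length - t := by rw [hdrop.symm]; simp
          have h2 : L'.length = rest.length + 1 := by simp [L']
          omega
        have hGmR : Gm R ≤ Gm (q :: rest) :=
          le_trans (Gm_sublist_le _ _ (List.dropWhile_sublist _))
            (Gm_step_le (q :: rest) hσ)
        have hfuel' : R.length + Gm R < fuel := by
          have := hfuel
          simp only [List.length_cons] at this
          omega
        rw [hdrop, ih R (ans ++ [(t : Int)]) hRσ hfuel']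
        -- it remains to relate the grouping
        have hd1 : dOf q = 1 := by
          have h1 := (complete_iff q.1 q.2 hq2).mp hrel
          have h2 := dayOf_ge_one q.1 q.2
          simp only [dOf]; omega
        have hcong : rest.takeWhile ((fun r => decide (100 ≤ r.1)) ∘ stepP) =
            rest.takeWhile (fun r => decide (dOf r ≤ 1)) := by
          apply takeWhile_congr_mem
          intro x hx
          have hx2 : 1 ≤ x.2 := hσ x (by simp [hx])
          simp only [Function.comp, stepP, decide_eq_decide, dOf]
          exact complete_iff x.1 x.2 hx2
        have hcongD : rest.dropWhile ((fun r => decide (100 ≤ r.1)) ∘ stepP) =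
            rest.dropWhile (fun r => decide (dOf r ≤ 1)) := by
          apply dropWhile_congr_mem
          intro x hx
          have hx2 : 1 ≤ x.2 := hσ x (by simp [hx])
          simp only [Function.comp, stepP, decide_eq_decide, dOf]
          exact complete_iff x.1 x.2 hx2
        set E := rest.dropWhile (fun r => decide (dOf r ≤ 1)) with hE
        have hREmap : R = E.map stepP := by
          rw [hR, hL']
          rw [List.map_cons, List.dropWhile_cons_of_pos
            (by simp [stepP]; omega)]
          rw [List.dropWhile_map, hcongD]
        have hRdOf : R.map dOf = (E.map dOf).map (fun d => max 1 (d - 1)) := by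
          rw [hREmap, List.map_map, List.map_map]
          apply List.map_congr_left
          intro x hx
          have hx2 : 1 ≤ x.2 :=
            hσ x (List.mem_cons_of_mem q (List.Sublist.mem hx (List.dropWhile_sublist _)))
          simp only [Function.comp, stepP, dOf]
          exact dayOf_step x.1 x.2 hx2
        have hEhead : ∀ y ∈ (E.map dOf).head?, 2 ≤ y := by
          intro y hy
          cases hEc : E with
          | nil => rw [hEc] at hy; simp at hy
          | cons e es =>
            rw [hEc] at hy
            simp only [List.map_cons, List.head?_cons, Option.mem_def, Option.some.injEq] at hy
            have hne := head?_dropWhile_not (fun r => decide (dOf r ≤ 1)) rest e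
              (by rw [← hE, hEc]; simp)
            simp only [decide_eq_false_iff_not, not_le] at hne
            have := dayOf_ge_one e.1 e.2
            simp only [← hy, dOf]
            simp only [dOf] at hne
            omega
        have e2 : L'.takeWhile (fun r => decide (100 ≤ r.1)) =
            stepP q :: (rest.takeWhile (fun r => decide (dOf r ≤ 1))).map stepP := by
          rw [hL', List.map_cons, List.takeWhile_cons_of_pos (by simp [stepP]; omega),
            List.takeWhile_map, hcong]
        have e1 : (rest.map dOf).takeWhile (fun x => decide (x ≤ 1)) =
            (rest.takeWhile (fun r => decide (dOf r ≤ 1))).map dOf := by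
          rw [List.takeWhile_map]
          exact congrArg (List.map dOf) (takeWhile_congr_mem _ _ rest (fun x _ => rfl))
        have e3 : (rest.map dOf).dropWhile (fun x => decide (x ≤ 1)) = E.map dOf := by
          rw [List.dropWhile_map]
          exact congrArg (List.map dOf) (dropWhile_congr_mem _ _ rest (fun x _ => rfl))
        have hgroups : groupsSpec ((q :: rest).map dOf) = (t : Int) :: groupsSpec (R.map dOf) := by
          rw [List.map_cons, groupsSpec, hd1, htlen, e2, e1, e3]
          rw [hRdOf, groupsSpec_shift (E.map dOf).length (E.map dOf) (le_refl _) hEhead]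
          congr 1
          simp
          omega
        rw [hgroups]
        simp
      · -- nobody completes: just another day passes
        have hstep : loopP (fuel + 1) (q :: rest) ans = loopP fuel ((q :: rest).map stepP) ans := by
          simp [loopP, stepP, show ¬ ((100:Int) ≤ q.1 + q.2) from hrel]
        rw [hstep]
        have hσ' : ∀ r ∈ (q :: rest).map stepP, 1 ≤ r.2 := mem_stepP_snd _ hσ
        have hGmlt : Gm ((q :: rest).map stepP) < Gm (q :: rest) := by
          have hle := Gm_step_le rest (fun x hx => hσ x (by simp [hx]))
          simp only [Gm, List.map_cons, List.sum_cons, List.map_map] at *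
          have hhead : (100 - (stepP q).1).toNat < (100 - q.1).toNat := by
            simp only [stepP]; omega
          omega
        have hfuel' : ((q :: rest).map stepP).length + Gm ((q :: rest).map stepP) < fuel := by
          simp only [List.length_map, List.length_cons] at *
          omega
        rw [ih _ ans hσ' hfuel']
        congr 1
        have hmap : ((q :: rest).map stepP).map dOf =
            ((q :: rest).map dOf).map (fun d => max 1 (d - 1)) := by
          rw [List.map_map, List.map_map]
          apply List.map_congr_left
          intro x hx
          have hx2 : 1 ≤ x.2 := hσ x hx
          simp only [Function.comp, stepP, dOf]
          exact dayOf_step x.1 x.2 hx2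
        have hhead2 : ∀ y ∈ ((q :: rest).map dOf).head?, 2 ≤ y := by
          intro y hy
          simp only [List.map_cons, List.head?_cons, Option.mem_def, Option.some.injEq] at hy
          have h1 := (complete_iff q.1 q.2 hq2).not.mp hrel
          simp only [← hy, dOf]
          have := dayOf_ge_one q.1 q.2
          omega
        rw [hmap, groupsSpec_shift ((q :: rest).map dOf).length _ (le_refl _) hhead2]

-- ## bridge: loopA over two lists = loopP over pairs

theorem loopA_eq_loopP : ∀ (fuel : Nat) (L : List (Int × Int)) (ex ans : List Int),
    loopA fuel (L.map Prod.fst) (L.map Prod.snd ++ ex) ans = loopP fuel L ans := by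
  intro fuel
  induction fuel with
  | zero => intro L ex ans; rfl
  | succ fuel ih =>
    intro L ex ans
    cases L with
    | nil => simp [loopA, loopP]
    | cons q rest =>
      set L' := (q :: rest).map stepP with hL'
      have hfst : List.zipWith (· + ·) ((q :: rest).map Prod.fst) ((q :: rest).map Prod.snd ++ ex)
          = L'.map Prod.fst := zipWith_add_fst _ _
      have hsnd : (q :: rest).map Prod.snd = L'.map Prod.snd := (snd_map_stepP _).symm
      have htc : tempCount (L'.map Prod.fst) = tempCountP L' := tempCount_map_fst _
      have hhd : (L'.map Prod.fst).headD 0 = q.1 + q.2 := by simp [hL', stepP]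
      have hhdP : (L'.headD (0, 0)).1 = q.1 + q.2 := by simp [hL', stepP]
      by_cases hrel : (100:Int) ≤ q.1 + q.2
      · have htpos : 0 < tempCountP L' := by
          simp [hL', tempCountP, stepP, show ¬ (q.1 + q.2 < 100) by omega]
        set t := tempCountP L' with ht
        have htle : t ≤ L'.length := tempCountP_le L'
        have hstepA : loopA (fuel + 1) ((q :: rest).map Prod.fst) ((q :: rest).map Prod.snd ++ ex) ans
            = loopA fuel ((L'.drop t).map Prod.fst) ((L'.drop t).map Prod.snd ++ ex) (ans ++ [(t : Int)]) := by
          simp only [loopA, List.map_cons, List.isEmpty_cons, Bool.false_eq_true, if_false]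
          rw [show (q.1 :: rest.map Prod.fst) = (q :: rest).map Prod.fst by simp,
            show ((q.2 :: rest.map Prod.snd) ++ ex) = (q :: rest).map Prod.snd ++ ex by simp, hfst]
          rw [hhd, if_pos (by omega : (100:Int) ≤ q.1 + q.2), htc]
          rw [if_pos (by omega : t > 0)]
          congr 1
          · simp [List.map_drop]
          · rw [hsnd, List.drop_append_of_le_length (by simpa using htle)]
            simp [List.map_drop]
        have hstepP : loopP (fuel + 1) (q :: rest) ans = loopP fuel (L'.drop t) (ans ++ [(t : Int)]) := by
          simp only [loopP, List.isEmpty_cons, Bool.false_eq_true, if_false]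
          rw [← hL', hhdP, if_pos (by omega : (100:Int) ≤ q.1 + q.2)]
          rw [if_pos (by omega : t > 0)]
        rw [hstepA, hstepP, ih]
      · set t := tempCountP L' with ht
        have hstepA : loopA (fuel + 1) ((q :: rest).map Prod.fst) ((q :: rest).map Prod.snd ++ ex) ans
            = loopA fuel (L'.map Prod.fst) (L'.map Prod.snd ++ ex) ans := by
          simp only [loopA, List.map_cons, List.isEmpty_cons, Bool.false_eq_true, if_false]
          rw [show (q.1 :: rest.map Prod.fst) = (q :: rest).map Prod.fst by simp,
            show ((q.2 :: rest.map Prod.snd) ++ ex) = (q :: rest).map Prod.snd ++ ex by simp, hfst]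
          rw [hhd, if_neg (by omega : ¬ (100:Int) ≤ q.1 + q.2)]
          rw [if_neg (by omega : ¬ (0 > 0)), hsnd]
        have hstepP : loopP (fuel + 1) (q :: rest) ans = loopP fuel L' ans := by
          simp only [loopP, List.isEmpty_cons, Bool.false_eq_true, if_false]
          rw [← hL', hhdP, if_neg (by omega : ¬ (100:Int) ≤ q.1 + q.2)]
          rw [if_neg (by omega : ¬ (0 > 0))]
        rw [hstepA, hstepP, ih]

-- ===== VERDICT (by name: the statement is the Claim_ definition above) =====
theorem solution_spec : Claim_equal_solution := by
  intro ps ss _ hpre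
  obtain ⟨hlen, hsp⟩ := hpre
  unfold Spec_solution
  set L := ps.zip ss with hL
  have h1 : L.map Prod.fst = ps := List.map_fst_zip hlen
  have htk : L.map Prod.snd = ss.take ps.length := by
    rw [hL, zip_take_len]
    exact List.map_snd_zip (by simp [hlen])
  have h2 : L.map Prod.snd ++ ss.drop ps.length = ss := by
    rw [htk, List.take_append_drop]
  have hσ : ∀ q ∈ L, 1 ≤ q.2 := by
    intro x hx
    apply hsp
    rw [hL, zip_take_len] at hx
    exact (List.of_mem_zip hx).2
  have hLlen : L.length = ps.length := by simp [hL]; omega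
  have hGm : Gm L = (ps.map (fun p => (100 - p).toNat)).sum := by
    have hmm : L.map (fun q => (100 - q.1).toNat) = ps.map (fun p => (100 - p).toNat) := by
      rw [show (fun q : Int × Int => (100 - q.1).toNat) =
        (fun p : Int => (100 - p).toNat) ∘ Prod.fst from rfl, ← List.map_map, h1]
    simp [Gm, hmm]
  have hfuel : L.length + Gm L < fuelFor ps := by
    simp [fuelFor, hLlen, hGm]
  calc solution ps ss
      = loopA (fuelFor ps) (L.map Prod.fst) (L.map Prod.snd ++ ss.drop ps.length) [] := by
        rw [h1, h2]; rfl
    _ = loopP (fuelFor ps) L [] := loopA_eq_loopP _ _ _ _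
    _ = [] ++ groupsSpec (L.map dOf) := loopP_eq _ L [] hσ hfuel
    _ = solution_alt ps ss := by rw [alt_eq_groups, hL]; simp
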